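-- pv_equiv track=rewrite | github.com/vsriv9394/pySuite | pymake/make.py | formatVarDecl
-- ===== SOURCE A (Python) =====
-- def pyType(token):
--
--     if token=='char*':
--         return 'C.c_char_p'
--
--     elif token=='void*':
--         return 'C.c_void_p'
--
--     elif token[-1]=='*':
--         return 'C.POINTER(' + pyType(token[:-1]) + ')'
--
--     elif token in ['int', 'double', 'char']:
--         return 'C.c_'+token
--
--     else: return token
--
-- def formatVarDecl(varName, varType):
--
--     while varName[0]=='*':
--         varName = varName[1:]
--         varType += '*'
--     varType = pyType(varType)
--
--     if varName[-1] not in [')',']']: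
--         return varName, varType
--
--     if varName[0]=='(' and varName[-1]==')':
--         return formatVarDecl(varName[1:-1], varType)
--
--     if varName[-1]==']':
--         i=-2; c=''
--         while varName[i]!='[':
--             c = varName[i] + c
--             i -= 1
--         varName = varName[:i]
--         assert c!='', \
--             'Cannot handle zero-dimensional array type (e.g. int a[])'
--         if varType[-1] in [str(i) for i in range(9)]:
--             varType = '(' + varType + ')'
--         varType += '*' + c
--         return formatVarDecl(varName, varType)
-- ===== SOURCE B (Python) =====
-- def pyType(token):
--     n = 0
--     while token.endswith('*') and token not in ('char*', 'void*'):
--         token = token[:-1]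
--         n += 1
--     if token == 'char*':
--         base = 'C.c_char_p'
--     elif token == 'void*':
--         base = 'C.c_void_p'
--     elif token in ('int', 'double', 'char'):
--         base = 'C.c_' + token
--     else:
--         base = token
--     for _ in range(n):
--         base = 'C.POINTER(' + base + ')'
--     return base
--
-- def formatVarDecl(varName, varType):
--     while True:
--         stripped = varName.lstrip('*')
--         varType += '*' * (len(varName) - len(stripped))
--         varName = stripped
--         varType = pyType(varType)
--         last = varName[-1]
--         if last == ')' and varName[0] == '(':
--             varName = varName[1:-1]
--         elif last == ']':
--             j = varName.rindex('[', 0, len(varName) - 1)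
--             c = varName[j + 1:-1]
--             assert c != '', \
--                 'Cannot handle zero-dimensional array type (e.g. int a[])'
--             if varType[-1] in '012345678':
--                 varType = '(' + varType + ')'
--             varType += '*' + c
--             varName = varName[:j]
--         else:
--             return varName, varType
-- ===== Notes on version B (the rewrite author's own statement) =====
-- stated objective: alternative
-- what changed: Tail recursion with per-level star-stripping while loops and a hand-rolled backward bracket scan is replaced by a single iterative while-True loop using lstrip/rindex/slicing, and the recursive pyType is replaced by a strip-count-then-wrap iteration.
-- outside the precondition, e.g. on formatVarDecl('a)', 'int'): A returns None, B returns ('a)', 'C.c_int')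
import Mathlib
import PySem

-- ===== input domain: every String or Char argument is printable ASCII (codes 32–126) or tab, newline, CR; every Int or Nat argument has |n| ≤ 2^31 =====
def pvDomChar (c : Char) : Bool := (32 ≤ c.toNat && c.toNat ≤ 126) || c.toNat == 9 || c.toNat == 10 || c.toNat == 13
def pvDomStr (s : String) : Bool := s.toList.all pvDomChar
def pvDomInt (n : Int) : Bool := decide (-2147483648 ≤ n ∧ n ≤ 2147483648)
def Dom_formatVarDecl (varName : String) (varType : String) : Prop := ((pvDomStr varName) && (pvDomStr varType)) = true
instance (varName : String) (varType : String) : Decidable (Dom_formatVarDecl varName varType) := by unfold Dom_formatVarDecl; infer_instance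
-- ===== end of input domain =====

-- B replaces A's tail recursion (with hand-rolled star-strip and backward bracket-scan loops) by one
-- iterative loop using lstrip/rindex-style slicing and an iterative strip-count-then-wrap pyType;
-- same values everywhere A returns a string pair (objective: alternative, not faster).


-- ===== PORT A =====

-- pyType, A's recursive version (Python raises IndexError on '' / all-star tokens; there the
-- final else returns the token unchanged instead — such inputs are excluded by Pre_ below).
def pyTypeA (t : List Char) : List Char :=
  if t = "char*".toList then "C.c_char_p".toList
  else if t = "void*".toList then "C.c_void_p".toList
  else if h : t.getLast? = some '*' then
    "C.POINTER(".toList ++ pyTypeA t.dropLast ++ ")".toList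
  else if t = "int".toList ∨ t = "double".toList ∨ t = "char".toList then "C.c_".toList ++ t
  else t
termination_by t.length
decreasing_by
  have h0 : t ≠ [] := by intro he; subst he; simp at h
  have h1 := List.length_pos_iff.mpr h0
  have h2 : t.dropLast.length = t.length - 1 := by simp
  omega

-- the 'while varName[0]=='*'' loop of A
def stripStarsA : List Char → List Char → List Char × List Char
  | [], t => ([], t)
  | ch :: rest, t => if ch = '*' then stripStarsA rest (t ++ ['*']) else (ch :: rest, t)

-- the 'while varName[i]!='['' backward scan of A, run over reversed varName[:-1];
-- exhausting the list is Python's IndexError (no '[' present): those inputs are outside Pre_,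
-- the port then returns a junk second component ([]).
def collectA : List Char → List Char → List Char × List Char
  | [], c => (c, [])
  | ch :: rest, c => if ch = '[' then (c, rest) else collectA rest (ch :: c)

theorem collectA_rest_len (l acc : List Char) : (collectA l acc).2.length ≤ l.length - 1 := by
  induction l generalizing acc with
  | nil => simp [collectA]
  | cons ch tl ih =>
    simp only [collectA]
    split
    · simp
    · have := ih (ch :: acc)
      simp only [List.length_cons]
      omega

theorem stripStarsA_eq (n t : List Char) :
    stripStarsA n t =
      (n.dropWhile (· = '*'), t ++ List.replicate (n.length - (n.dropWhile (· = '*')).length) '*') := by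
  induction n generalizing t with
  | nil => simp [stripStarsA]
  | cons ch tl ih =>
    by_cases h : ch = '*'
    · subst h
      have hle : (tl.dropWhile (· = '*')).length ≤ tl.length := (List.dropWhile_sublist _).length_le
      rw [stripStarsA, if_pos rfl, ih]
      rw [show List.dropWhile (· = '*') ('*' :: tl) = List.dropWhile (· = '*') tl from by
        rw [List.dropWhile_cons_of_pos]; decide]
      have : tl.length + 1 - (tl.dropWhile (· = '*')).length
           = (tl.length - (tl.dropWhile (· = '*')).length) + 1 := by omega
      rw [List.length_cons, this, List.replicate_succ, List.append_assoc]
      rfl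
    · rw [stripStarsA, if_neg h, List.dropWhile_cons_of_neg (by simpa using h)]
      simp

theorem stripStarsA_fst_len (n t : List Char) : (stripStarsA n t).1.length ≤ n.length := by
  rw [stripStarsA_eq]; exact (List.dropWhile_sublist _).length_le

def fvdACore : List Char × List Char → List Char × List Char
  | (n, t0) =>
    let t := pyTypeA t0
    if hn : n = [] then (n, t)      -- Python: IndexError on empty varName (outside Pre_)
    else
      let last := n.getLast hn
      if ¬ (last = ')' ∨ last = ']') then (n, t)
      else if last = ')' ∧ n.head? = some '(' then
        fvdACore (stripStarsA ((n.drop 1).dropLast) t)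
      else if last = ']' then
        let cr := collectA n.dropLast.reverse []
        if cr.1 = [] then (n, t)    -- Python: AssertionError on '[]' (outside Pre_)
        else
          let t2 := match t.getLast? with
            | some d => if d ∈ ['0','1','2','3','4','5','6','7','8'] then '(' :: (t ++ [')']) else t
            | none => t             -- unreachable inside Pre_
          fvdACore (stripStarsA cr.2.reverse (t2 ++ '*' :: cr.1))
      else (n, t)                   -- Python returns None here (ends ')' without '('; outside Pre_)
termination_by p => p.1.length
decreasing_by
  · show (stripStarsA ((n.drop 1).dropLast) t).1.length < n.length
    have h1 : (stripStarsA ((n.drop 1).dropLast) t).1.length ≤ ((n.drop 1).dropLast).length :=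
      stripStarsA_fst_len _ _
    have h2 := List.length_pos_iff.mpr hn
    have h3 : ((n.drop 1).dropLast).length = (n.drop 1).length - 1 := by simp
    have h4 : (n.drop 1).length = n.length - 1 := by simp
    omega
  · show (stripStarsA cr.2.reverse (t2 ++ '*' :: cr.1)).1.length < n.length
    have h1 : (stripStarsA cr.2.reverse (t2 ++ '*' :: cr.1)).1.length ≤ cr.2.reverse.length :=
      stripStarsA_fst_len _ _
    have h2 := List.length_pos_iff.mpr hn
    have h3 : cr.2.length ≤ n.dropLast.reverse.length - 1 := collectA_rest_len _ _
    have h4 : n.dropLast.reverse.length = n.dropLast.length := by simp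
    have h5 : n.dropLast.length = n.length - 1 := by simp
    have h6 : cr.2.reverse.length = cr.2.length := by simp
    omega

-- A's formatVarDecl: strip leading stars (the entry while loop), then dispatch
def fvdA (nm tp : List Char) : List Char × List Char := fvdACore (stripStarsA nm tp)

def formatVarDecl (varName : String) (varType : String) : String × String :=
  let r := fvdA varName.toList varType.toList
  (String.ofList r.1, String.ofList r.2)

-- ===== PORT B =====

-- B's pyType: count trailing stars down to the base token, map the base, then wrap n POINTERs
def stripTrailB (t : List Char) : List Char × Nat :=
  if h : t ≠ "char*".toList ∧ t ≠ "void*".toList ∧ t.getLast? = some '*' then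
    let p := stripTrailB t.dropLast
    (p.1, p.2 + 1)
  else (t, 0)
termination_by t.length
decreasing_by
  have h0 : t ≠ [] := by intro he; subst he; simp at h
  have h1 := List.length_pos_iff.mpr h0
  have h2 : t.dropLast.length = t.length - 1 := by simp
  omega

def wrapPtrB : Nat → List Char → List Char
  | 0, b => b
  | n + 1, b => wrapPtrB n ("C.POINTER(".toList ++ b ++ ")".toList)

def pyTypeB (t : List Char) : List Char :=
  let p := stripTrailB t
  let base :=
    if p.1 = "char*".toList then "C.c_char_p".toList
    else if p.1 = "void*".toList then "C.c_void_p".toList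
    else if p.1 = "int".toList ∨ p.1 = "double".toList ∨ p.1 = "char".toList then "C.c_".toList ++ p.1
    else p.1
  wrapPtrB p.2 base

def fvdB (nm tp : List Char) : List Char × List Char :=
  let s := nm.dropWhile (· = '*')
  let t := pyTypeB (tp ++ List.replicate (nm.length - s.length) '*')
  if hn : s = [] then (s, t)       -- Python raises (outside Pre_)
  else
    let last := s.getLast hn
    if last = ')' ∧ s.head? = some '(' then fvdB ((s.drop 1).dropLast) t
    else if last = ']' then
      let body := s.dropLast
      if '[' ∈ body then
        let j := body.length - 1 - body.reverse.idxOf '['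
        let c := body.drop (j + 1)
        if c = [] then (s, t)      -- assert fails (outside Pre_)
        else
          let t2 := match t.getLast? with
            | some d => if d ∈ "012345678".toList then '(' :: (t ++ [')']) else t
            | none => t
          fvdB (body.take j) (t2 ++ '*' :: c)
      else (s, t)                  -- rindex raises (outside Pre_)
    else (s, t)
termination_by nm.length
decreasing_by
  · show (s.drop 1).dropLast.length < nm.length
    have h1 : s.length ≤ nm.length := (List.dropWhile_sublist _).length_le
    have h3 := List.length_pos_iff.mpr hn
    have h4 : ((s.drop 1).dropLast).length = (s.drop 1).length - 1 := by simp
    have h5 : (s.drop 1).length = s.length - 1 := by simp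
    omega
  · show (body.take j).length < nm.length
    have h1 : s.length ≤ nm.length := (List.dropWhile_sublist _).length_le
    have h3 := List.length_pos_iff.mpr hn
    have h4 : (body.take j).length ≤ body.length := by
      simpa using List.length_take_le j body
    have h5 : body.length = s.length - 1 := by
      show (s.dropLast).length = s.length - 1; simp
    omega

def formatVarDecl_alt (varName : String) (varType : String) : String × String :=
  let r := fvdB varName.toList varType.toList
  (String.ofList r.1, String.ofList r.2)

-- ===== PRECONDITION & SPEC =====

-- Closed-form grammar of the declarator names A parses to completion: after leading '*'s, either a
-- nonempty token not ending in ')'/']', or '( … )' around a good name, or a good name followed by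
-- a nonempty bracket group '[…]'.
-- Closed-form grammar of the declarator names A parses to completion: after leading '*'s, either a
-- nonempty token not ending in ')'/']', or '( … )' around a good name, or a good name followed by
-- a nonempty bracket group '[…]'.  The Nat index is the string length (each grammar step consumes
-- at least one character), so the predicate is structurally recursive and kernel-computable.
def goodAux : Nat → List Char → Bool
  | 0, _ => false
  | fuel + 1, nm =>
    let s := nm.dropWhile (· = '*')
    if hn : s = [] then false
    else
      let l := s.getLast hn
      if ¬ (l = ')' ∨ l = ']') then true
      else if l = ')' ∧ s.head? = some '(' then goodAux fuel ((s.drop 1).dropLast)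
      else if l = ']' then
        let body := s.dropLast
        let crev := body.reverse.takeWhile (· ≠ '[')
        ('[' ∈ body) && (crev ≠ []) && goodAux fuel ((body.reverse.drop (crev.length + 1)).reverse)
      else false

def GoodName (nm : List Char) : Bool := goodAux nm.length nm

-- Pre_ excludes exactly: inputs where A raises (empty/all-star name remainder, all-star or empty
-- type, no '[' before a closing ']', empty '[]' group), and names ending ')' without a leading '('
-- on which A falls off the end and returns None, not a pair of strings.
def Pre_formatVarDecl (varName : String) (varType : String) : Prop :=
  GoodName varName.toList = true ∧ varType.toList.any (· ≠ '*') = true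

instance (varName : String) (varType : String) : Decidable (Pre_formatVarDecl varName varType) := by
  unfold Pre_formatVarDecl; infer_instance

def pvWitness_formatVarDecl : String × String := ("(*a)[3]", "int")

def Spec_formatVarDecl (varName : String) (varType : String) (out : String × String) : Prop :=
  out = formatVarDecl_alt varName varType
instance (varName : String) (varType : String) (out : String × String) : Decidable (Spec_formatVarDecl varName varType out) := by unfold Spec_formatVarDecl; infer_instance

-- ===== CLAIM (what is proved, stated in full; the proofs are below) =====
def Claim_equal_formatVarDecl : Prop := ∀ (varName : String) (varType : String), Dom_formatVarDecl varName varType → Pre_formatVarDecl varName varType → Spec_formatVarDecl varName varType (formatVarDecl varName varType)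

-- ===== LEMMAS AND PROOFS =====

theorem idxOf_eq_len_takeWhile (l : List Char) :
    List.idxOf '[' l = (l.takeWhile (· ≠ '[')).length := by
  induction l with
  | nil => rfl
  | cons a tl ih =>
    by_cases h : a = '['
    · subst h; simp [List.takeWhile_cons]
    · simp [List.takeWhile_cons, h, ih]

theorem len_takeWhile_lt (l : List Char) (h : '[' ∈ l) :
    (l.takeWhile (· ≠ '[')).length < l.length := by
  induction l with
  | nil => simp at h
  | cons a tl ih =>
    by_cases ha : a = '['
    · subst ha; simp
    · rcases List.mem_cons.mp h with h1 | h1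
      · exact absurd h1.symm ha
      · have h2 := ih h1
        simp only [List.takeWhile_cons, List.length_cons]
        simp only [show (fun x => decide (x ≠ '[')) a = true by simp [ha], if_true]
        simpa using h2

theorem take_len_takeWhile (l : List Char) :
    l.take (l.takeWhile (· ≠ '[')).length = l.takeWhile (· ≠ '[') :=
  (List.prefix_iff_eq_take.mp (List.takeWhile_prefix _)).symm

theorem collectA_spec (l : List Char) (h : '[' ∈ l) : ∀ acc,
    collectA l acc =
      ((l.takeWhile (· ≠ '[')).reverse ++ acc,
       l.drop ((l.takeWhile (· ≠ '[')).length + 1)) := by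
  induction l with
  | nil => simp at h
  | cons a tl ih =>
    intro acc
    by_cases ha : a = '['
    · subst ha; simp [collectA]
    · rcases List.mem_cons.mp h with h1 | h1
      · exact absurd h1.symm ha
      · simp only [collectA, if_neg ha, ih h1, List.takeWhile_cons]
        simp [ha]

theorem wrapPtrB_out (n : Nat) (b : List Char) :
    wrapPtrB n ("C.POINTER(".toList ++ b ++ ")".toList)
      = "C.POINTER(".toList ++ wrapPtrB n b ++ ")".toList := by
  induction n generalizing b with
  | zero => rfl
  | succ m ih => rw [wrapPtrB, wrapPtrB, ih]

theorem pyType_eq_aux : ∀ fuel (t : List Char), t.length ≤ fuel → t.any (· ≠ '*') = true →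
    pyTypeA t = pyTypeB t := by
  intro fuel
  induction fuel with
  | zero =>
    intro t hl h
    have ht : t = [] := List.length_eq_zero_iff.mp (Nat.le_zero.mp hl)
    subst ht; simp at h
  | succ m ih =>
    intro t hl h
    by_cases h1 : t = "char*".toList
    · subst h1; rw [pyTypeA]; unfold pyTypeB; rw [stripTrailB]; simp [wrapPtrB]
    · by_cases h2 : t = "void*".toList
      · subst h2; rw [pyTypeA]; unfold pyTypeB; rw [stripTrailB]; simp [wrapPtrB]
      · by_cases h3 : t.getLast? = some '*'
        · have hne : t ≠ [] := by rintro rfl; simp at h3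
          have hgl : t.getLast hne = '*' := by
            rw [List.getLast?_eq_some_getLast hne] at h3; exact Option.some.inj h3
          have hsplit : t.dropLast ++ ['*'] = t := by
            conv_rhs => rw [← List.dropLast_append_getLast hne]
            rw [hgl]
          have hany : t.dropLast.any (· ≠ '*') = true := by
            rw [← hsplit, List.any_append] at h
            simpa using h
          have hlen : t.dropLast.length ≤ m := by
            have e1 : t.dropLast.length = t.length - 1 := by simp
            have e2 := List.length_pos_iff.mpr hne
            omega
          have hIH := ih t.dropLast hlen hany
          have hst : stripTrailB t = ((stripTrailB t.dropLast).1, (stripTrailB t.dropLast).2 + 1) := by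
            rw [stripTrailB]; rw [dif_pos ⟨h1, h2, h3⟩]
          rw [pyTypeA]; rw [if_neg h1, if_neg h2, dif_pos h3]
          unfold pyTypeB
          rw [hst, wrapPtrB, wrapPtrB_out, hIH]
          rfl
        · have hst : stripTrailB t = (t, 0) := by
            rw [stripTrailB]; rw [dif_neg (by tauto)]
          rw [pyTypeA]; rw [if_neg h1, if_neg h2, dif_neg h3]
          unfold pyTypeB
          rw [hst]
          show _ = (if t = "char*".toList then _ else if t = "void*".toList then _
            else if t = "int".toList ∨ t = "double".toList ∨ t = "char".toList then _ else t)
          rw [if_neg h1, if_neg h2]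

theorem pyType_eq (t : List Char) (h : t.any (· ≠ '*') = true) :
    pyTypeA t = pyTypeB t := pyType_eq_aux t.length t le_rfl h

theorem pyTypeA_any (t : List Char) (h : t.any (· ≠ '*') = true) :
    (pyTypeA t).any (· ≠ '*') = true := by
  rw [pyTypeA]
  split_ifs with h1 h2 h3 h4
  · decide
  · decide
  · have hC : ("C.POINTER(".toList).any (· ≠ '*') = true := by decide
    simp [List.any_append, hC]
  · have hC : ("C.c_".toList).any (· ≠ '*') = true := by decide
    simp [hC]
  · exact h

theorem main_aux : ∀ fuel nm tp, nm.length ≤ fuel → goodAux fuel nm = true →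
    tp.any (· ≠ '*') = true → fvdA nm tp = fvdB nm tp := by
  intro fuel
  induction fuel with
  | zero => intro nm tp _ hg _; simp [goodAux] at hg
  | succ m ih =>
    intro nm tp hl hg ht
    have hA : fvdA nm tp
        = fvdACore (nm.dropWhile (· = '*'),
            tp ++ List.replicate (nm.length - (nm.dropWhile (· = '*')).length) '*') := by
      rw [fvdA, stripStarsA_eq]
    rw [hA, fvdACore, fvdB]
    rw [goodAux] at hg
    simp only at hg ⊢
    have hslen : (nm.dropWhile (· = '*')).length ≤ nm.length := (List.dropWhile_sublist _).length_le
    have ht0any : (tp ++ List.replicate (nm.length - (nm.dropWhile (· = '*')).length) '*').any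
        (· ≠ '*') = true := by
      rw [List.any_append, ht]; rfl
    have hT := pyType_eq _ ht0any
    have hTany := pyTypeA_any _ ht0any
    by_cases hnil : nm.dropWhile (· = '*') = []
    · rw [dif_pos hnil] at hg; exact absurd hg (by simp)
    · rw [dif_neg hnil] at hg ⊢
      rw [dif_neg hnil]
      by_cases hterm : ¬((nm.dropWhile (· = '*')).getLast hnil = ')'
          ∨ (nm.dropWhile (· = '*')).getLast hnil = ']')
      · rw [if_pos hterm, if_neg (fun hc => hterm (Or.inl hc.1)),
            if_neg (fun hc => hterm (Or.inr hc)), hT]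
      · by_cases hpar : (nm.dropWhile (· = '*')).getLast hnil = ')'
            ∧ (nm.dropWhile (· = '*')).head? = some '('
        · rw [if_neg hterm, if_pos hpar] at hg ⊢
          rw [if_pos hpar]
          have hstep : fvdACore (stripStarsA (((nm.dropWhile (· = '*')).drop 1).dropLast)
              (pyTypeA (tp ++ List.replicate (nm.length - (nm.dropWhile (· = '*')).length) '*')))
              = fvdA (((nm.dropWhile (· = '*')).drop 1).dropLast)
                  (pyTypeA (tp ++ List.replicate (nm.length - (nm.dropWhile (· = '*')).length) '*')) := by
            rw [fvdA]
          rw [hstep, ← hT]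
          apply ih
          · have e1 : (((nm.dropWhile (· = '*')).drop 1).dropLast).length
                = ((nm.dropWhile (· = '*')).drop 1).length - 1 := by simp
            have e2 : ((nm.dropWhile (· = '*')).drop 1).length
                = (nm.dropWhile (· = '*')).length - 1 := by simp
            have e3 := List.length_pos_iff.mpr hnil
            omega
          · exact hg
          · exact hTany
        · by_cases hbr : (nm.dropWhile (· = '*')).getLast hnil = ']'
          · rw [if_neg hterm, if_neg hpar, if_pos hbr] at hg ⊢
            rw [if_neg hpar, if_pos hbr]
            simp only [Bool.and_eq_true, decide_eq_true_eq] at hg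
            obtain ⟨⟨hmem, hcne⟩, hgood⟩ := hg
            have hmem' : '[' ∈ (nm.dropWhile (· = '*')).dropLast.reverse := by
              simpa using hmem
            have hcne' : ((nm.dropWhile (· = '*')).dropLast.reverse.takeWhile (· ≠ '[')) ≠ [] := by
              simpa using hcne
            rw [collectA_spec _ hmem']
            rw [if_pos hmem]
            -- abbreviations
            have hklt := len_takeWhile_lt _ hmem'
            have hidx := idxOf_eq_len_takeWhile ((nm.dropWhile (· = '*')).dropLast.reverse)
            have hrevlen : (nm.dropWhile (· = '*')).dropLast.reverse.length
                = (nm.dropWhile (· = '*')).dropLast.length := by simp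
            -- c agreement
            have hdropc : (nm.dropWhile (· = '*')).dropLast.drop
                  ((nm.dropWhile (· = '*')).dropLast.length - 1
                    - (nm.dropWhile (· = '*')).dropLast.reverse.idxOf '[' + 1)
                = ((nm.dropWhile (· = '*')).dropLast.reverse.takeWhile (· ≠ '[')).reverse := by
              rw [hidx]
              rw [show (nm.dropWhile (· = '*')).dropLast.length - 1
                    - ((nm.dropWhile (· = '*')).dropLast.reverse.takeWhile (· ≠ '[')).length + 1
                  = (nm.dropWhile (· = '*')).dropLast.length
                    - ((nm.dropWhile (· = '*')).dropLast.reverse.takeWhile (· ≠ '[')).length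
                  from by omega]
              rw [← List.reverse_reverse ((nm.dropWhile (· = '*')).dropLast.drop _),
                  List.reverse_drop, ← hrevlen]
              rw [show (nm.dropWhile (· = '*')).dropLast.reverse.length
                    - ((nm.dropWhile (· = '*')).dropLast.reverse.length
                      - ((nm.dropWhile (· = '*')).dropLast.reverse.takeWhile (· ≠ '[')).length)
                  = ((nm.dropWhile (· = '*')).dropLast.reverse.takeWhile (· ≠ '[')).length
                  from by omega]
              rw [take_len_takeWhile]
            -- rest agreement
            have htake : (nm.dropWhile (· = '*')).dropLast.take
                  ((nm.dropWhile (· = '*')).dropLast.length - 1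
                    - (nm.dropWhile (· = '*')).dropLast.reverse.idxOf '[')
                = ((nm.dropWhile (· = '*')).dropLast.reverse.drop
                    (((nm.dropWhile (· = '*')).dropLast.reverse.takeWhile (· ≠ '[')).length + 1)).reverse := by
              rw [hidx]
              rw [← List.reverse_reverse ((nm.dropWhile (· = '*')).dropLast.take _),
                  List.reverse_take, ← hrevlen]
              rw [show (nm.dropWhile (· = '*')).dropLast.reverse.length
                    - ((nm.dropWhile (· = '*')).dropLast.reverse.length - 1
                      - ((nm.dropWhile (· = '*')).dropLast.reverse.takeWhile (· ≠ '[')).length)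
                  = ((nm.dropWhile (· = '*')).dropLast.reverse.takeWhile (· ≠ '[')).length + 1
                  from by omega]
            rw [hdropc, htake]
            simp only [List.append_nil]
            rw [if_neg (by simpa using hcne'), if_neg (by simpa using hcne')]
            rw [show ("012345678".toList : List Char)
                = ['0','1','2','3','4','5','6','7','8'] from rfl]
            rw [← hT]
            have hstep : ∀ t2 : List Char,
                fvdACore (stripStarsA
                  ((nm.dropWhile (· = '*')).dropLast.reverse.drop
                    (((nm.dropWhile (· = '*')).dropLast.reverse.takeWhile (· ≠ '[')).length + 1)).reverse
                  (t2 ++ '*' :: ((nm.dropWhile (· = '*')).dropLast.reverse.takeWhile (· ≠ '[')).reverse))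
                = fvdA ((nm.dropWhile (· = '*')).dropLast.reverse.drop
                    (((nm.dropWhile (· = '*')).dropLast.reverse.takeWhile (· ≠ '[')).length + 1)).reverse
                  (t2 ++ '*' :: ((nm.dropWhile (· = '*')).dropLast.reverse.takeWhile (· ≠ '[')).reverse) := by
              intro t2; rw [fvdA]
            rw [hstep]
            apply ih
            · have e1 : (nm.dropWhile (· = '*')).dropLast.length
                  = (nm.dropWhile (· = '*')).length - 1 := by simp
              have e2 := List.length_pos_iff.mpr hnil
              have e3 : (((nm.dropWhile (· = '*')).dropLast.reverse.drop
                    (((nm.dropWhile (· = '*')).dropLast.reverse.takeWhile (· ≠ '[')).length + 1)).reverse).length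
                  = (nm.dropWhile (· = '*')).dropLast.reverse.length
                    - (((nm.dropWhile (· = '*')).dropLast.reverse.takeWhile (· ≠ '[')).length + 1) := by
                simp
              omega
            · exact hgood
            · -- any of t2 ++ '*' :: c
              rw [List.any_append]
              suffices h2 : (match (pyTypeA (tp ++ List.replicate
                    (nm.length - (nm.dropWhile (· = '*')).length) '*')).getLast? with
                  | some d => if d ∈ ['0','1','2','3','4','5','6','7','8']
                      then '(' :: (pyTypeA (tp ++ List.replicate
                        (nm.length - (nm.dropWhile (· = '*')).length) '*') ++ [')'])
                      else pyTypeA (tp ++ List.replicate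
                        (nm.length - (nm.dropWhile (· = '*')).length) '*')
                  | none => pyTypeA (tp ++ List.replicate
                      (nm.length - (nm.dropWhile (· = '*')).length) '*')).any (· ≠ '*') = true by
                rw [h2]; rfl
              cases hgl2 : (pyTypeA (tp ++ List.replicate
                  (nm.length - (nm.dropWhile (· = '*')).length) '*')).getLast? with
              | none => exact hTany
              | some d =>
                simp only []
                split_ifs
                · simp only [List.any_cons, List.any_append]
                  rw [hTany]; rfl
                · exact hTany
          · -- ends ')' without '(': both terminal
            have hcl : (nm.dropWhile (· = '*')).getLast hnil = ')' := by
              rcases not_not.mp hterm with h | h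
              · exact h
              · exact absurd h hbr
            rw [if_neg hterm, if_neg hpar, if_neg hbr, if_neg hpar, if_neg hbr, hT]

theorem main_lemma (nm tp : List Char) (hg : GoodName nm = true)
    (ht : tp.any (· ≠ '*') = true) : fvdA nm tp = fvdB nm tp :=
  main_aux nm.length nm tp le_rfl hg ht

-- ===== VERDICT (by name: the statement is the Claim_ definition above) =====
theorem formatVarDecl_spec : Claim_equal_formatVarDecl := by
  intro vn vt _ hpre
  unfold Spec_formatVarDecl formatVarDecl formatVarDecl_alt
  rw [main_lemma vn.toList vt.toList hpre.1 hpre.2]
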